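-- pv_equiv track=rewrite | github.com/Abhi001vj/coding-interview-preparation | fizzzbizzVarients.py | findWordsContainingPattern
-- ===== SOURCE A (Python) =====
-- from typing import List
--
-- def findWordsContainingPattern(words: List[str], pattern: str) -> List[int]:
--     """
--     Find words matching a pattern where '.' matches any character.
--     Example: pattern "a.c" matches "abc", "axc", etc.
--     Time: O(n * m)
--     Space: O(1)
--     """
--     def matches_pattern(word: str, pattern: str) -> bool:
--         if len(word) != len(pattern):
--             return False
--
--         for i in range(len(word)):
--             if pattern[i] != '.' and pattern[i] != word[i]:
--                 return False
--         return True
--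
--     result = []
--     for i, word in enumerate(words):
--         if matches_pattern(word, pattern):
--             result.append(i)
--
--     return result
-- ===== SOURCE B (Python) =====
-- from typing import List
--
-- def findWordsContainingPattern(words: List[str], pattern: str) -> List[int]:
--     # Pattern-major sieve: start from all indices of words of the right length,
--     # then, for each constrained (non-'.') pattern position, keep only the
--     # candidates whose word agrees there. Filtering preserves index order,
--     # so the surviving candidates come out in the same order A emits them.
--     n = len(pattern)
--     candidates = [i for i, w in enumerate(words) if len(w) == n]
--     for j, c in enumerate(pattern):
--         if c != '.':
--             candidates = [i for i in candidates if words[i][j] == c]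
--     return candidates
-- ===== Notes on version B (the rewrite author's own statement) =====
-- stated objective: alternative
-- what changed: B inverts the loop nesting: instead of A's word-major scan (check each word against the whole pattern), B runs a pattern-major sieve that starts from all right-length indices and repeatedly filters the surviving candidate set once per constrained pattern position.
import Mathlib
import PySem

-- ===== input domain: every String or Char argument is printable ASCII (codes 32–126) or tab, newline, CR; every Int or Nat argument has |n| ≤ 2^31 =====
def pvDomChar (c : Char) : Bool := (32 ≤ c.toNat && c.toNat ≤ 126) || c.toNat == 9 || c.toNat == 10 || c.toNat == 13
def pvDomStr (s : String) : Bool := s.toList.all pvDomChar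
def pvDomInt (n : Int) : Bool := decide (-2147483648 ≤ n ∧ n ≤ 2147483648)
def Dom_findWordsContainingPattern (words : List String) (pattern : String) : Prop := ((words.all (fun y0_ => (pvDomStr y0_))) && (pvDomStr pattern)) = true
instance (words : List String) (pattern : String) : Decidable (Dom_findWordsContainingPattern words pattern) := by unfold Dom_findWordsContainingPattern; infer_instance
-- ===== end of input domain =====

-- B replaces A's word-major scan by a pattern-major sieve: start from all indices of
-- right-length words, then filter the surviving candidate list once per non-'.'
-- pattern position (alternative decomposition; same exact result and order).


-- ===== PORT A =====
-- inner helper matches_pattern: length check, then an index loop with early return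
-- (the early-returning loop is the Bool `all` over range(len), exact since `false`
-- is absorbing)
def matchesPatternA (word pattern : String) : Bool :=
  let w := word.toList
  let p := pattern.toList
  if w.length ≠ p.length then false
  else (List.range w.length).all (fun i => !(p[i]! != '.' && p[i]! != w[i]!))

def findWordsContainingPattern (words : List String) (pattern : String) : List Int :=
  (PySem.List.enumerate words).foldl
    (fun res iw => if matchesPatternA iw.2 pattern then res ++ [iw.1] else res) []

-- ===== PORT B =====
-- pattern-major sieve: candidates = right-length indices, then one filter pass per
-- constrained (non-'.') pattern position
def findWordsContainingPattern_alt (words : List String) (pattern : String) : List Int :=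
  let n := pattern.toList.length
  let candidates :=
    ((PySem.List.enumerate words).filter (fun iw => iw.2.toList.length == n)).map (fun iw => iw.1)
  (PySem.List.enumerate pattern.toList).foldl
    (fun cand jc =>
      if jc.2 != '.' then
        cand.filter (fun i => (words[i.toNat]!).toList[jc.1.toNat]! == jc.2)
      else cand)
    candidates

-- ===== PRECONDITION & SPEC =====
def Spec_findWordsContainingPattern (words : List String) (pattern : String) (out : List Int) : Prop := out = findWordsContainingPattern_alt words pattern
instance (words : List String) (pattern : String) (out : List Int) : Decidable (Spec_findWordsContainingPattern words pattern out) := by unfold Spec_findWordsContainingPattern; infer_instance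

-- ===== CLAIM (what is proved, stated in full; the proofs are below) =====
def Claim_equal_findWordsContainingPattern : Prop := ∀ (words : List String) (pattern : String), Dom_findWordsContainingPattern words pattern → Spec_findWordsContainingPattern words pattern (findWordsContainingPattern words pattern)

-- ===== LEMMAS AND PROOFS =====

lemma enumerate_eq_map_range {α : Type} [Inhabited α] (xs : List α) (s : Int) :
    PySem.List.enumerate xs s = (List.range xs.length).map (fun (k : Nat) => (s + (k : Int), xs[k]!)) := by
  induction xs generalizing s with
  | nil => simp [PySem.List.enumerate]
  | cons x xs ih =>
      rw [PySem.List.enumerate_cons, ih]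
      rw [List.length_cons, List.range_succ_eq_map, List.map_cons, List.map_map]
      congr 1
      · simp
      · apply List.map_congr_left
        intro k _
        show ((s + 1 + (k : Int), xs[k]!) : Int × α) = (s + ((k.succ : Nat) : Int), (x :: xs)[k.succ]!)
        apply Prod.ext
        · push_cast; ring
        · simp

-- the sieve loop is the single filter by the conjunction of all the constraints
lemma foldl_filter_all {α β : Type} (g : β → Bool) (P : β → α → Bool)
    (L : List β) (xs : List α) :
    L.foldl (fun acc jc => if g jc then acc.filter (P jc) else acc) xs
      = xs.filter (fun x => L.all (fun jc => !g jc || P jc x)) := by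
  induction L generalizing xs with
  | nil => simp
  | cons b L ih =>
      rw [List.foldl_cons, ih]
      by_cases hb : g b = true
      · rw [if_pos hb, List.filter_filter]
        apply List.filter_congr; intro x _
        simp [List.all_cons, hb, Bool.and_comm]
      · rw [if_neg hb]
        apply List.filter_congr; intro x _
        simp only [Bool.not_eq_true] at hb
        simp [List.all_cons, hb]

lemma filter_map_fst {α β : Type} (f : α → β) (p : β → Bool) (l : List α) :
    (l.map f).filter p = (l.filter (fun x => p (f x))).map f := by
  induction l with
  | nil => rfl
  | cons a l ih =>
      simp only [List.map_cons, List.filter_cons]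
      by_cases h : p (f a) = true
      · simp [h, ih]
      · simp only [Bool.not_eq_true] at h; simp [h, ih]

-- A's per-word check equals "right length and every enumerated constraint holds"
lemma matchesPatternA_eq_all (w pattern : String) :
    matchesPatternA w pattern =
      ((w.toList.length == pattern.toList.length) &&
        (PySem.List.enumerate pattern.toList).all
          (fun jc => !(jc.2 != '.') || w.toList[jc.1.toNat]! == jc.2)) := by
  unfold matchesPatternA
  by_cases h : w.toList.length = pattern.toList.length
  · rw [enumerate_eq_map_range pattern.toList 0]
    simp only [h, if_neg (by omega : ¬ pattern.toList.length ≠ pattern.toList.length),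
      beq_self_eq_true, Bool.true_and]
    rw [Bool.eq_iff_iff]
    simp only [List.all_eq_true, List.all_map, List.mem_range, Function.comp_apply]
    constructor
    · intro hall k hk
      have hL := hall k hk
      have hnat : ((0 : Int) + (k : Int)).toNat = k := by omega
      simp only [hnat]
      simp only [Bool.not_eq_true', Bool.and_eq_false_iff, bne_eq_false_iff_eq] at hL
      rcases hL with h1 | h1
      · simp [h1]
      · simp [h1]
    · intro hall k hk
      have hr := hall k hk
      have hnat : ((0 : Int) + (k : Int)).toNat = k := by omega
      rw [hnat] at hr
      simp only [Bool.or_eq_true, Bool.not_eq_true', bne_eq_false_iff_eq, beq_iff_eq] at hr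
      rcases hr with h1 | h1
      · simp [h1]
      · simp [h1]
  · simp only [if_pos h]
    have hb : (w.toList.length == pattern.toList.length) = false := by
      rw [beq_eq_false_iff_ne]; exact h
    rw [hb, Bool.false_and]

-- ===== VERDICT (by name: the statement is the Claim_ definition above) =====
theorem findWordsContainingPattern_spec : Claim_equal_findWordsContainingPattern := by
  intro words pattern _
  unfold Spec_findWordsContainingPattern findWordsContainingPattern findWordsContainingPattern_alt
  rw [PySem.List.foldl_append_if (fun iw => matchesPatternA iw.2 pattern)
        (fun iw => iw.1) (PySem.List.enumerate words) []]
  simp only [List.nil_append]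
  rw [foldl_filter_all, filter_map_fst, List.filter_filter]
  congr 1
  apply List.filter_congr
  intro iw hm
  rw [enumerate_eq_map_range words 0] at hm
  rcases List.mem_map.mp hm with ⟨k, _, rfl⟩
  have hnat : ((0 : Int) + (k : Int)).toNat = k := by omega
  rw [matchesPatternA_eq_all, Bool.and_comm]
  simp only [hnat]
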